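-- pv_equiv track=rewrite | github.com/wkai343/SiFli-SDK | tools/license/unify_license.py | _find_copyright_block_end
-- ===== SOURCE A (Python) =====
-- def _find_copyright_block_end(lines, start_index):
--     """找到版权声明块的结束位置"""
--     i = start_index
--     in_comment = False
--
--     while i < len(lines):
--         line = lines[i].strip()
--
--         if line.startswith('/*'):
--             in_comment = True
--
--         if in_comment and line.endswith('*/'):
--             # 检查这个注释块是否包含版权信息
--             block_content = '\n'.join(lines[start_index:i+1])
--             if any(keyword in block_content.lower() for keyword in ['copyright', 'spdx-', 'license']):
--                 return i
--             else:
--                 # 如果这个块不包含版权信息，停止搜索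
--                 return start_index - 1
--
--         i += 1
--
--     return start_index - 1
-- ===== SOURCE B (Python) =====
-- def _find_copyright_block_end(lines, start_index):
--     """Declarative formulation: the end line is the first index j whose stripped line
--     closes a comment ('*/') such that some line in [start_index, j] opens one ('/*');
--     no state machine, the 'inside a comment' state is re-derived per candidate."""
--     n = len(lines)
--     candidates = [j for j in range(start_index, n)
--                   if lines[j].strip().endswith('*/')
--                   and any(lines[k].strip().startswith('/*') for k in range(start_index, j + 1))]
--     if not candidates:
--         return start_index - 1
--     c = candidates[0]
--     content = '\n'.join(lines[start_index:c + 1]).lower()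
--     return c if any(kw in content for kw in ('copyright', 'spdx-', 'license')) else start_index - 1
-- ===== Notes on version B (the rewrite author's own statement) =====
-- stated objective: alternative
-- what changed: Replaced A's one-pass in_comment state machine by a declarative search: build the list of candidate closing lines, where a candidate is a '*/' line preceded (inclusively) by some '/*' line — the comment state is re-derived per candidate with a nested scan instead of carried in a flag — then keyword-test the block up to the first candidate.
import Mathlib
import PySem

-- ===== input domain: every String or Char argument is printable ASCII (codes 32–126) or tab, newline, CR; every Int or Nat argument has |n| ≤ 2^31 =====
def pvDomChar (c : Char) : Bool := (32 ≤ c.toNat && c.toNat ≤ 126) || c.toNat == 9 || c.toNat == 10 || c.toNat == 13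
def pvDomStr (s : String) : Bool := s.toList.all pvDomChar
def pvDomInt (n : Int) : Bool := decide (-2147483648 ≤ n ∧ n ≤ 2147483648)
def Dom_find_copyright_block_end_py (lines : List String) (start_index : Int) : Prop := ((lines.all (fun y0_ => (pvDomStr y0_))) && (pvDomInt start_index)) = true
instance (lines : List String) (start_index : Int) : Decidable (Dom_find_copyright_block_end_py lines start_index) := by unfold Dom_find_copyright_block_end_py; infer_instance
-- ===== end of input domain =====

-- B replaces A's one-pass in_comment state machine by a declarative candidate search that re-derives the comment state per closing line; objective: alternative.

-- ===== PORT A =====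
-- A's while loop, fuel = exact number of remaining iterations ((len - i).toNat)
def pvALoop (lines : List String) (start_index : Int) : Nat → Int → Bool → Int
  | 0, _, _ => start_index - 1
  | fuel+1, i, in_comment =>
    if i < (lines.length : Int) then
      let line := PySem.Str.strip ((PySem.List.pyGet? lines i).getD "")
      let in_comment' := in_comment || PySem.Str.startswith line "/*"
      if in_comment' && PySem.Str.endswith line "*/" then
        let block_content := PySem.Str.join "\n" (PySem.List.slice lines (some start_index) (some (i+1)))
        if PySem.Str.isIn "copyright" (PySem.Str.lower block_content) ||
           PySem.Str.isIn "spdx-" (PySem.Str.lower block_content) ||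
           PySem.Str.isIn "license" (PySem.Str.lower block_content) then i
        else start_index - 1
      else pvALoop lines start_index fuel (i+1) in_comment'
    else start_index - 1

def find_copyright_block_end_py (lines : List String) (start_index : Int) : Int :=
  pvALoop lines start_index ((lines.length : Int) - start_index).toNat start_index false

-- ===== PORT B =====
-- lines[i].strip()
def pvStripped (lines : List String) (i : Int) : String :=
  PySem.Str.strip ((PySem.List.pyGet? lines i).getD "")
-- lines[k].strip().startswith('/*')
def pvOpens (lines : List String) (k : Int) : Bool :=
  PySem.Str.startswith (pvStripped lines k) "/*"
-- lines[j].strip().endswith('*/')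
def pvCloses (lines : List String) (j : Int) : Bool :=
  PySem.Str.endswith (pvStripped lines j) "*/"

def find_copyright_block_end_py_alt (lines : List String) (start_index : Int) : Int :=
  let candidates := (PySem.List.pyRange start_index (lines.length : Int) 1).filter (fun j =>
      pvCloses lines j && (PySem.List.pyRange start_index (j+1) 1).any (fun k => pvOpens lines k))
  match candidates with
  | [] => start_index - 1
  | c :: _ =>
    let content := PySem.Str.lower (PySem.Str.join "\n" (PySem.List.slice lines (some start_index) (some (c+1))))
    if PySem.Str.isIn "copyright" content || PySem.Str.isIn "spdx-" content || PySem.Str.isIn "license" content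
    then c else start_index - 1

-- ===== PRECONDITION & SPEC =====
-- Pre_ excludes exactly the inputs where Python A raises IndexError: start_index below -len(lines) makes lines[i] fail (B raises there too).
def Pre_find_copyright_block_end_py (lines : List String) (start_index : Int) : Prop :=
  -(lines.length : Int) ≤ start_index
instance (lines : List String) (start_index : Int) : Decidable (Pre_find_copyright_block_end_py lines start_index) := by unfold Pre_find_copyright_block_end_py; infer_instance

def pvWitness_find_copyright_block_end_py : List String × Int := (["/* Copyright 2024 */", "int x;"], 0)

def Spec_find_copyright_block_end_py (lines : List String) (start_index : Int) (out : Int) : Prop := out = find_copyright_block_end_py_alt lines start_index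
instance (lines : List String) (start_index : Int) (out : Int) : Decidable (Spec_find_copyright_block_end_py lines start_index out) := by unfold Spec_find_copyright_block_end_py; infer_instance

-- ===== CLAIM (what is proved, stated in full; the proofs are below) =====
def Claim_equal_find_copyright_block_end_py : Prop := ∀ (lines : List String) (start_index : Int), Dom_find_copyright_block_end_py lines start_index → Pre_find_copyright_block_end_py lines start_index → Spec_find_copyright_block_end_py lines start_index (find_copyright_block_end_py lines start_index)

-- ===== LEMMAS AND PROOFS =====

-- the value returned once the closing line c is found (shared final step of both ports)
def pvRes (lines : List String) (start_index : Int) (c : Int) : Int :=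
  let content := PySem.Str.lower (PySem.Str.join "\n" (PySem.List.slice lines (some start_index) (some (c+1))))
  if PySem.Str.isIn "copyright" content || PySem.Str.isIn "spdx-" content || PySem.Str.isIn "license" content
  then c else start_index - 1

-- B's candidate predicate
def pvCand (lines : List String) (s j : Int) : Bool :=
  pvCloses lines j && (PySem.List.pyRange s (j+1) 1).any (fun k => pvOpens lines k)

-- A's loop with in_comment = 'some line in [s, i) opens a comment' equals B's filtered candidate search from i
theorem pvALoop_eq_filter (lines : List String) (s : Int) :
    ∀ (f : Nat) (i : Int), s ≤ i → ((lines.length : Int) - i).toNat = f →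
      pvALoop lines s f i ((PySem.List.pyRange s i 1).any (fun k => pvOpens lines k)) =
        (match (PySem.List.pyRange i (lines.length : Int) 1).filter (pvCand lines s) with
         | [] => s - 1
         | c :: _ => pvRes lines s c) := by
  intro f
  induction f with
  | zero =>
    intro i hsi hf
    have hni : (lines.length : Int) ≤ i := by omega
    rw [PySem.List.pyRange_one_eq_nil hni]
    simp [pvALoop]
  | succ f ih =>
    intro i hsi hf
    have hlt : i < (lines.length : Int) := by omega
    rw [PySem.List.pyRange_one_cons hlt]
    have hany : (PySem.List.pyRange s (i+1) 1).any (fun k => pvOpens lines k) =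
        ((PySem.List.pyRange s i 1).any (fun k => pvOpens lines k) || pvOpens lines i) := by
      rw [PySem.List.pyRange_one_succ_right hsi]
      simp
    rw [pvALoop]
    simp only [hlt, if_true, List.filter_cons]
    have e1 : PySem.Str.startswith (PySem.Str.strip ((PySem.List.pyGet? lines i).getD "")) "/*" = pvOpens lines i := rfl
    have e2 : PySem.Str.endswith (PySem.Str.strip ((PySem.List.pyGet? lines i).getD "")) "*/" = pvCloses lines i := rfl
    rw [e1, e2]
    have hcand : pvCand lines s i =
        (((PySem.List.pyRange s i 1).any (fun k => pvOpens lines k) || pvOpens lines i) && pvCloses lines i) := by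
      unfold pvCand
      rw [hany, Bool.and_comm]
    rw [← hcand]
    by_cases hc : pvCand lines s i = true
    · simp [hc, pvRes]
    · have hc' : pvCand lines s i = false := by
        simpa using hc
      simp only [hc', Bool.false_eq_true, if_false]
      rw [← hany]
      exact ih (i+1) (by omega) (by omega)

-- ===== VERDICT (by name: the statement is the Claim_ definition above) =====
theorem find_copyright_block_end_py_spec : Claim_equal_find_copyright_block_end_py := by
  intro lines s _ _
  unfold Spec_find_copyright_block_end_py find_copyright_block_end_py find_copyright_block_end_py_alt
  by_cases hsn : s ≤ (lines.length : Int)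
  · have := pvALoop_eq_filter lines s (((lines.length : Int) - s).toNat) s (le_refl s) rfl
    rw [PySem.List.pyRange_one_eq_nil (by omega : s ≤ s), List.any_nil] at this
    rw [this]
    unfold pvCand pvCloses pvOpens pvStripped pvRes
    rfl
  · have h0 : ((lines.length : Int) - s).toNat = 0 := by omega
    rw [h0]
    rw [PySem.List.pyRange_one_eq_nil (by omega : (lines.length : Int) ≤ s)]
    simp [pvALoop]
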